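-- pv_equiv track=rewrite | github.com/wanghan7678/PmAssignment01 | infrastructure/util/util.py | remove_leading_trailing_zeros
-- ===== SOURCE A (Python) =====
-- def remove_leading_trailing_zeros(lst):
--     leading_zeros = 0
--     for num in lst:
--         if num == 0:
--             leading_zeros += 1
--         else:
--             break
--     trailing_zeros = 0
--     for num in reversed(lst):
--         if num == 0:
--             trailing_zeros += 1
--         else:
--             break
--
--     if leading_zeros + trailing_zeros >= len(lst):
--         result = []
--     else:
--         result = lst[leading_zeros:len(lst) - trailing_zeros]
--
--     return result, leading_zeros, trailing_zeros
-- ===== SOURCE B (Python) =====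
-- def remove_leading_trailing_zeros(lst):
--     span = None
--     for i, num in enumerate(lst):
--         if num != 0:
--             span = (i, i) if span is None else (span[0], i)
--     if span is None:
--         return [], len(lst), len(lst)
--     first, last = span
--     return lst[first:last + 1], first, len(lst) - 1 - last
-- ===== Notes on version B (the rewrite author's own statement) =====
-- stated objective: alternative
-- what changed: Replaces A's two short-circuit scans (forward and reversed) plus a guarded slice with one forward enumerate pass that records the (first,last) non-zero index span and derives both counts and the slice from it.
import Mathlib
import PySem

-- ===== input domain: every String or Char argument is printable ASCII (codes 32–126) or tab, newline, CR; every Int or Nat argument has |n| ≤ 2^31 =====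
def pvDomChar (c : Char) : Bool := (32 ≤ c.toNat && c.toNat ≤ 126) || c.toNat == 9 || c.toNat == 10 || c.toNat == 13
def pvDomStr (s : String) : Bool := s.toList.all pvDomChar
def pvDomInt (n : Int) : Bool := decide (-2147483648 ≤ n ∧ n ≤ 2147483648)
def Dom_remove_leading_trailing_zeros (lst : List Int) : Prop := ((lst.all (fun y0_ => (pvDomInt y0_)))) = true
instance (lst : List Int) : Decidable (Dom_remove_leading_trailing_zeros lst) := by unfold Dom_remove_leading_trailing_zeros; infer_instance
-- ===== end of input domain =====

-- B replaces A's two short-circuit scans (forward and reversed) with one forward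
-- pass recording the (first, last) non-zero index span; alternative decomposition, same cost.


-- ===== PORT A =====
-- A's first loop (and, applied to lst.reverse, its second): count zeros until a non-zero breaks
def pvLeadZeros : List Int → Int
  | [] => 0
  | num :: rest => if num == 0 then pvLeadZeros rest + 1 else 0

def remove_leading_trailing_zeros (lst : List Int) : List Int × Int × Int :=
  let leading := pvLeadZeros lst
  let trailing := pvLeadZeros lst.reverse
  let result :=
    if leading + trailing ≥ (lst.length : Int) then ([] : List Int)
    else PySem.List.slice lst (some leading) (some ((lst.length : Int) - trailing))
  (result, leading, trailing)

-- ===== PORT B =====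
-- B's single enumerate loop: span = none, or some (first, last) non-zero index
def pvScanNZ : List Int → Int → Option (Int × Int) → Option (Int × Int)
  | [], _, span => span
  | num :: rest, i, span =>
      if num ≠ 0 then
        pvScanNZ rest (i + 1) (match span with | none => some (i, i) | some (f, _) => some (f, i))
      else
        pvScanNZ rest (i + 1) span

def remove_leading_trailing_zeros_alt (lst : List Int) : List Int × Int × Int :=
  match pvScanNZ lst 0 none with
  | none => ([], (lst.length : Int), (lst.length : Int))
  | some (first, last) =>
      (PySem.List.slice lst (some first) (some (last + 1)), first, (lst.length : Int) - 1 - last)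

-- ===== PRECONDITION & SPEC =====
def Spec_remove_leading_trailing_zeros (lst : List Int) (out : List Int × Int × Int) : Prop := out = remove_leading_trailing_zeros_alt lst
instance (lst : List Int) (out : List Int × Int × Int) : Decidable (Spec_remove_leading_trailing_zeros lst out) := by unfold Spec_remove_leading_trailing_zeros; infer_instance

-- ===== CLAIM (what is proved, stated in full; the proofs are below) =====
def Claim_equal_remove_leading_trailing_zeros : Prop := ∀ (lst : List Int), Dom_remove_leading_trailing_zeros lst → Spec_remove_leading_trailing_zeros lst (remove_leading_trailing_zeros lst)

-- ===== LEMMAS AND PROOFS =====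

theorem pv_allzero_cons {y : Int} {t : List Int} (hy : y = 0) (ht : ∀ x ∈ t, x = 0) :
    ∀ x ∈ y :: t, x = 0 := by
  intro x hx
  rcases List.mem_cons.1 hx with h | h
  · rw [h, hy]
  · exact ht x h

theorem pv_allzero_tail {y : Int} {t : List Int} (h : ∀ x ∈ y :: t, x = 0) : ∀ x ∈ t, x = 0 :=
  fun x hx => h x (List.mem_cons_of_mem _ hx)

theorem pv_allzero_rev {t : List Int} (h : ∀ x ∈ t, x = 0) : ∀ x ∈ t.reverse, x = 0 :=
  fun x hx => h x (List.mem_reverse.1 hx)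

theorem pv_allzero_rev' {t : List Int} (h : ∀ x ∈ t.reverse, x = 0) : ∀ x ∈ t, x = 0 :=
  fun x hx => h x (List.mem_reverse.2 hx)

theorem pvLeadZeros_nonneg (xs : List Int) : 0 ≤ pvLeadZeros xs := by
  induction xs with
  | nil => simp [pvLeadZeros]
  | cons x t ih => simp only [pvLeadZeros]; split_ifs <;> omega

theorem pvLeadZeros_le (xs : List Int) : pvLeadZeros xs ≤ (xs.length : Int) := by
  induction xs with
  | nil => simp [pvLeadZeros]
  | cons x t ih => simp only [pvLeadZeros, List.length_cons]; split_ifs <;> push_cast <;> omega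

theorem pvLeadZeros_append_zeros (ys zs : List Int) (h : ∀ x ∈ ys, x = 0) :
    pvLeadZeros (ys ++ zs) = (ys.length : Int) + pvLeadZeros zs := by
  induction ys with
  | nil => simp [pvLeadZeros]
  | cons y t ih =>
      have hy : y = 0 := h y List.mem_cons_self
      have hrec := ih (pv_allzero_tail h)
      simp only [List.cons_append, pvLeadZeros, hy, List.length_cons]
      simp [hrec]
      ring

theorem pvLeadZeros_append_nz (ys zs : List Int) (h : ¬ ∀ x ∈ ys, x = 0) :
    pvLeadZeros (ys ++ zs) = pvLeadZeros ys := by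
  induction ys with
  | nil => exact absurd (by simp) h
  | cons y t ih =>
      by_cases hy : y = 0
      · have ht : ¬ ∀ x ∈ t, x = 0 := fun hh => h (pv_allzero_cons hy hh)
        simp [pvLeadZeros, hy, ih ht]
      · simp [pvLeadZeros, hy]

theorem pvLeadZeros_allzero (xs : List Int) (h : ∀ x ∈ xs, x = 0) :
    pvLeadZeros xs = (xs.length : Int) := by
  have := pvLeadZeros_append_zeros xs [] h
  simpa [pvLeadZeros] using this

-- every not-all-zero list splits as zeros ++ nonzero :: rest, with the zero prefix = pvLeadZeros
theorem pvDecomp (xs : List Int) (h : ¬ ∀ x ∈ xs, x = 0) :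
    ∃ a n b, xs = a ++ n :: b ∧ (∀ x ∈ a, x = 0) ∧ n ≠ 0 ∧ pvLeadZeros xs = (a.length : Int) := by
  induction xs with
  | nil => exact absurd (by simp) h
  | cons x t ih =>
      by_cases hx : x = 0
      · have ht : ¬ ∀ y ∈ t, y = 0 := fun hh => h (pv_allzero_cons hx hh)
        obtain ⟨a, n, b, he, ha, hn, hl⟩ := ih ht
        refine ⟨x :: a, n, b, by simp [he], pv_allzero_cons hx ha, hn, ?_⟩
        simp only [pvLeadZeros, hx, List.length_cons]
        simp [hl]
      · exact ⟨[], x, t, by simp, by simp, hx, by simp [pvLeadZeros, hx]⟩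

theorem pvScanNZ_zeros (a : List Int) (r : List Int) (i : Int) (span : Option (Int × Int))
    (h : ∀ x ∈ a, x = 0) :
    pvScanNZ (a ++ r) i span = pvScanNZ r (i + (a.length : Int)) span := by
  induction a generalizing i with
  | nil => simp
  | cons x t ih =>
      have hx : x = 0 := h x List.mem_cons_self
      have hrec := ih (i + 1) (pv_allzero_tail h)
      simp only [List.cons_append, pvScanNZ, hx]
      simp [hrec, List.length_cons]
      ring_nf

theorem pvScanNZ_some (b : List Int) (j f l : Int) :
    pvScanNZ b j (some (f, l)) =
      some (f, if ∀ x ∈ b, x = 0 then l else j + (b.length : Int) - 1 - pvLeadZeros b.reverse) := by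
  induction b generalizing j l with
  | nil => simp [pvScanNZ]
  | cons x t ih =>
      by_cases hx : x = 0
      · have hne : ¬ (x ≠ 0) := by simp [hx]
        simp only [pvScanNZ, if_neg hne]
        rw [ih]
        by_cases ht : ∀ y ∈ t, y = 0
        · rw [if_pos ht, if_pos (pv_allzero_cons hx ht)]
        · have hcons : ¬ ∀ y ∈ x :: t, y = 0 := fun hh => ht (pv_allzero_tail hh)
          have hr : pvLeadZeros (x :: t).reverse = pvLeadZeros t.reverse := by
            rw [List.reverse_cons]
            exact pvLeadZeros_append_nz t.reverse [x] (fun hh => ht (pv_allzero_rev' hh))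
          rw [if_neg ht, if_neg hcons, hr]
          have harith : j + 1 + (t.length : Int) - 1 - pvLeadZeros t.reverse
              = j + (((x :: t).length : Nat) : Int) - 1 - pvLeadZeros t.reverse := by
            push_cast [List.length_cons]; ring
          rw [harith]
      · simp only [pvScanNZ, if_pos hx]
        rw [ih]
        have hcons : ¬ ∀ y ∈ x :: t, y = 0 := fun hh => hx (hh x List.mem_cons_self)
        by_cases ht : ∀ y ∈ t, y = 0
        · have hr : pvLeadZeros (x :: t).reverse = (t.length : Int) := by
            rw [List.reverse_cons,
                pvLeadZeros_append_zeros t.reverse [x] (pv_allzero_rev ht)]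
            simp [pvLeadZeros, hx]
          rw [if_pos ht, if_neg hcons, hr]
          have harith : j = j + (((x :: t).length : Nat) : Int) - 1 - (t.length : Int) := by
            push_cast [List.length_cons]; ring
          rw [← harith]
        · have hr : pvLeadZeros (x :: t).reverse = pvLeadZeros t.reverse := by
            rw [List.reverse_cons]
            exact pvLeadZeros_append_nz t.reverse [x] (fun hh => ht (pv_allzero_rev' hh))
          rw [if_neg ht, if_neg hcons, hr]
          have harith : j + 1 + (t.length : Int) - 1 - pvLeadZeros t.reverse
              = j + (((x :: t).length : Nat) : Int) - 1 - pvLeadZeros t.reverse := by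
            push_cast [List.length_cons]; ring
          rw [harith]

theorem pvScanNZ_allzero (xs : List Int) (i : Int) (span : Option (Int × Int))
    (h : ∀ x ∈ xs, x = 0) : pvScanNZ xs i span = span := by
  have := pvScanNZ_zeros xs [] i span h
  simpa [pvScanNZ] using this

-- ===== VERDICT (by name: the statement is the Claim_ definition above) =====
theorem remove_leading_trailing_zeros_spec : Claim_equal_remove_leading_trailing_zeros := by
  intro lst _
  unfold Spec_remove_leading_trailing_zeros remove_leading_trailing_zeros remove_leading_trailing_zeros_alt
  by_cases hz : ∀ x ∈ lst, x = 0
  · rw [pvScanNZ_allzero lst 0 none hz]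
    rw [pvLeadZeros_allzero lst hz, pvLeadZeros_allzero lst.reverse (pv_allzero_rev hz)]
    simp only [List.length_reverse]
    have hge : (lst.length : Int) + (lst.length : Int) ≥ (lst.length : Int) := by
      have : (0:Int) ≤ (lst.length : Int) := by positivity
      omega
    simp [hge]
  · obtain ⟨a, n, b, he, ha, hn, hl⟩ := pvDecomp lst hz
    have hlen : (lst.length : Int) = (a.length : Int) + 1 + (b.length : Int) := by
      rw [he]; push_cast [List.length_append, List.length_cons]; ring
    have hscan : pvScanNZ lst 0 none =
        some ((a.length : Int),
          if ∀ x ∈ b, x = 0 then (a.length : Int)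
          else (a.length : Int) + 1 + (b.length : Int) - 1 - pvLeadZeros b.reverse) := by
      rw [he, pvScanNZ_zeros a (n :: b) 0 none ha]
      simp only [pvScanNZ, if_pos hn, zero_add]
      rw [pvScanNZ_some b ((a.length : Int) + 1) (a.length : Int) (a.length : Int)]
    have htrail : pvLeadZeros lst.reverse =
        if ∀ x ∈ b, x = 0 then (b.length : Int) else pvLeadZeros b.reverse := by
      rw [he]
      simp only [List.reverse_append, List.reverse_cons, List.append_assoc]
      by_cases hb : ∀ x ∈ b, x = 0
      · rw [pvLeadZeros_append_zeros b.reverse ([n] ++ a.reverse) (pv_allzero_rev hb), if_pos hb]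
        simp [pvLeadZeros, hn]
      · rw [pvLeadZeros_append_nz b.reverse ([n] ++ a.reverse) (fun hh => hb (pv_allzero_rev' hh)),
            if_neg hb]
    rw [hscan, hl, htrail]
    by_cases hb : ∀ x ∈ b, x = 0
    · have hbz : pvLeadZeros b.reverse = (b.length : Int) := by
        have := pvLeadZeros_allzero b.reverse (pv_allzero_rev hb)
        simpa using this
      simp only [if_pos hb]
      have hnge : ¬ ((a.length : Int) + (b.length : Int) ≥ (lst.length : Int)) := by omega
      rw [if_neg hnge]
      have e1 : (lst.length : Int) - (b.length : Int) = (a.length : Int) + 1 := by omega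
      have e2 : (lst.length : Int) - 1 - (a.length : Int) = (b.length : Int) := by omega
      rw [e1, e2]
    · have hble : pvLeadZeros b.reverse ≤ (b.length : Int) := by
        have := pvLeadZeros_le b.reverse; simpa using this
      have hbnn := pvLeadZeros_nonneg b.reverse
      simp only [if_neg hb]
      have hnge : ¬ ((a.length : Int) + pvLeadZeros b.reverse ≥ (lst.length : Int)) := by omega
      rw [if_neg hnge]
      have e1 : (lst.length : Int) - pvLeadZeros b.reverse
          = (a.length : Int) + 1 + (b.length : Int) - 1 - pvLeadZeros b.reverse + 1 := by omega
      have e2 : (lst.length : Int) - 1 - ((a.length : Int) + 1 + (b.length : Int) - 1 - pvLeadZeros b.reverse)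
          = pvLeadZeros b.reverse := by omega
      rw [e1, e2]
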